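-- pv_equiv track=rewrite | github.com/hectormartinez/verdi_project_release | src/classify_omission_vs_same.py | _ner_sequences
-- ===== SOURCE A (Python) =====
-- def _ner_sequences(taggedarray):
--     #TODO try all models (3/4/7) and see if it makes a difference, which it does not.
--     acc = []
--     sequences = set()
--     for w, t in taggedarray:
--         if t != "O":
--             acc.append(w)
--         elif acc:
--             sequences.add(" ".join(acc))
--             acc = []
--     if acc:
--         sequences.add(" ".join(acc))
--         acc = []
--     return sequences
-- ===== SOURCE B (Python) =====
-- def _ner_sequences(taggedarray):
--     # Staged / vectorized formulation: compute the boolean entity mask, find run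
--     # boundaries by comparing the mask with its shifted copies, then slice out
--     # each run by index.  No accumulator state machine, no post-loop flush.
--     tags = [t != "O" for _, t in taggedarray]
--     words = [w for w, _ in taggedarray]
--     starts = [i for i, (cur, prev) in enumerate(zip(tags, [False] + tags)) if cur and not prev]
--     ends = [i for i, (cur, nxt) in enumerate(zip(tags, tags[1:] + [False])) if cur and not nxt]
--     return {" ".join(words[s:e + 1]) for s, e in zip(starts, ends)}
-- ===== Notes on version B (the rewrite author's own statement) =====
-- stated objective: alternative
-- what changed: Replaces the single-pass accumulator/flush state machine by a staged formulation: build the boolean entity mask, detect run starts/ends by comparing the mask with its shifted copies, then slice each run out of the word list by index.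
import Mathlib
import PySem

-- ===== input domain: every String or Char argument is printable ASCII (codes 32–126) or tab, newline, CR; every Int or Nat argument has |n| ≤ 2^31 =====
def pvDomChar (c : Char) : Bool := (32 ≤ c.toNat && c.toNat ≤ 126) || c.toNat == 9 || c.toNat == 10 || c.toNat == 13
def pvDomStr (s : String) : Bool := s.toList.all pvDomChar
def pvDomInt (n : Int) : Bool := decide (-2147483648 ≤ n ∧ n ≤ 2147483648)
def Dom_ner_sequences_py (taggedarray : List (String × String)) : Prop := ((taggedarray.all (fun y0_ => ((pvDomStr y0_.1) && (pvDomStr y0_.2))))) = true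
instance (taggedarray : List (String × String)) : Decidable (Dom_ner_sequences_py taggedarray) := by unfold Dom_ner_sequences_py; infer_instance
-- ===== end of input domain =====

-- B replaces A's accumulator/flush state machine by staged passes: an entity mask,
-- run boundaries from shifted copies of the mask, then index slicing; objective: alternative.

-- ===== PORT A =====
-- loop body of A's for-loop over (acc, sequences)
def stepA (st : List String × PySem.Set String) (wt : String × String) : List String × PySem.Set String :=
  if wt.2 != "O" then (st.1 ++ [wt.1], st.2)
  else if st.1 ≠ [] then ([], PySem.Set.add st.2 (PySem.Str.join " " st.1))
  else st
-- A's post-loop flush of a pending acc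
def postA (st : List String × PySem.Set String) : PySem.Set String :=
  if st.1 ≠ [] then PySem.Set.add st.2 (PySem.Str.join " " st.1) else st.2

def ner_sequences_py (taggedarray : List (String × String)) : List String :=
  postA (taggedarray.foldl stepA ([], PySem.Set.empty))

-- ===== PORT B =====
-- boundary condition of B's two comprehensions: current flag set, neighbour flag clear
def boundaryB (ip : Int × (Bool × Bool)) : Option Int :=
  if ip.2.1 && !ip.2.2 then some ip.1 else none

def ner_sequences_py_alt (taggedarray : List (String × String)) : List String :=
  let tags := taggedarray.map (fun wt => wt.2 != "O")
  let words := taggedarray.map (fun wt => wt.1)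
  let starts := (PySem.List.enumerate (tags.zip (false :: tags)) 0).filterMap boundaryB
  let ends := (PySem.List.enumerate (tags.zip (PySem.List.slice tags (some 1) none ++ [false])) 0).filterMap boundaryB
  PySem.Set.ofList ((starts.zip ends).map
    (fun se => PySem.Str.join " " (PySem.List.slice words (some se.1) (some (se.2 + 1)))))

-- ===== PRECONDITION & SPEC =====
def Spec_ner_sequences_py (taggedarray : List (String × String)) (out : List String) : Prop := out = ner_sequences_py_alt taggedarray
instance (taggedarray : List (String × String)) (out : List String) : Decidable (Spec_ner_sequences_py taggedarray out) := by unfold Spec_ner_sequences_py; infer_instance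

-- ===== CLAIM =====
def Claim_equal_ner_sequences_py : Prop := ∀ (taggedarray : List (String × String)), Dom_ner_sequences_py taggedarray → Spec_ner_sequences_py taggedarray (ner_sequences_py taggedarray)

-- ===== LEMMAS AND PROOFS =====

-- A's loop + post-flush, written as one recursion (proof helper)
def loopA (l : List (String × String)) (acc : List String) (s : PySem.Set String) : PySem.Set String :=
  match l with
  | [] => if acc ≠ [] then PySem.Set.add s (PySem.Str.join " " acc) else s
  | wt :: rest =>
    if wt.2 != "O" then loopA rest (acc ++ [wt.1]) s
    else if acc ≠ [] then loopA rest [] (PySem.Set.add s (PySem.Str.join " " acc))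
    else loopA rest acc s

-- the joined string of each maximal entity run, in order (common reference value)
def joined (l : List (String × String)) : List String :=
  match l with
  | [] => []
  | p :: rest =>
    if p.2 != "O" then
      PySem.Str.join " " ((p :: rest.takeWhile (fun q => q.2 != "O")).map Prod.fst)
        :: joined (rest.dropWhile (fun q => q.2 != "O"))
    else joined rest
termination_by l.length
decreasing_by
  · simp only [List.length_cons]
    exact Nat.lt_succ_of_le (List.length_dropWhile_le _ _)
  · simp

-- relative recursions computing B's boundary index lists
def startsAux (prev : Bool) (m : List Bool) : List Int :=
  match m with
  | [] => []
  | c :: r => (if c && !prev then [(0 : Int)] else []) ++ (startsAux c r).map (· + 1)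

def endsAux (m : List Bool) : List Int :=
  match m with
  | [] => []
  | c :: r => (if c && !(r.headD false) then [(0 : Int)] else []) ++ (endsAux r).map (· + 1)

theorem loopA_eq_fold (l : List (String × String)) (acc : List String) (s : PySem.Set String) :
    loopA l acc s = postA (l.foldl stepA (acc, s)) := by
  induction l generalizing acc s with
  | nil => simp [loopA, postA]
  | cons wt rest ih =>
    by_cases h1 : (wt.2 != "O") = true
    · simp [loopA, h1, ih, stepA]
    · by_cases h2 : acc = []
      · simp [loopA, h1, h2, ih, stepA]
      · simp [loopA, h1, h2, ih, stepA]

-- with a pending nonempty acc: consume the entity run, flush the joined string, continue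
theorem loopA_pending (l : List (String × String)) (acc : List String) (s : PySem.Set String)
    (hacc : acc ≠ []) :
    loopA l acc s =
      loopA (l.dropWhile (fun q => q.2 != "O")) []
        (PySem.Set.add s (PySem.Str.join " "
          (acc ++ (l.takeWhile (fun q => q.2 != "O")).map Prod.fst))) := by
  induction l generalizing acc s with
  | nil => simp [loopA, hacc]
  | cons wt rest ih =>
    by_cases h1 : (wt.2 != "O") = true
    · have e1 : loopA (wt :: rest) acc s = loopA rest (acc ++ [wt.1]) s := by
        simp [loopA, h1]
      rw [e1, ih _ _ (by simp)]
      simp [h1]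
    · simp [loopA, h1, hacc]

theorem loopA_joined (l : List (String × String)) (s : PySem.Set String) :
    loopA l [] s = (joined l).foldl PySem.Set.add s := by
  match l with
  | [] => simp [loopA, joined]
  | p :: rest =>
    by_cases h1 : (p.2 != "O") = true
    · have e1 : loopA (p :: rest) [] s = loopA rest [p.1] s := by simp [loopA, h1]
      rw [e1, loopA_pending rest [p.1] s (by simp),
        loopA_joined (rest.dropWhile (fun q => q.2 != "O")) _]
      conv_rhs => rw [joined]
      simp [h1]
    · have e1 : loopA (p :: rest) [] s = loopA rest [] s := by simp [loopA, h1]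
      rw [e1, loopA_joined rest s]
      conv_rhs => rw [joined]
      simp [h1]
termination_by l.length
decreasing_by
  · simp only [List.length_cons]
    exact Nat.lt_succ_of_le (List.length_dropWhile_le _ _)
  · simp

-- B's starts comprehension computes startsAux
theorem startsAux_spec (m : List Bool) (prev : Bool) (k : Int) :
    (PySem.List.enumerate (m.zip (prev :: m)) k).filterMap boundaryB
      = (startsAux prev m).map (· + k) := by
  induction m generalizing prev k with
  | nil => simp [startsAux]
  | cons c r ih =>
    have hz : (c :: r).zip (prev :: c :: r) = (c, prev) :: r.zip (c :: r) := rfl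
    rw [hz, PySem.List.enumerate_cons, List.filterMap_cons, ih c (k + 1), startsAux]
    by_cases hc : (c && !prev) = true
    · simp [boundaryB, hc, List.map_map]
      intro a ha; ring
    · simp [boundaryB, hc, List.map_map]
      intro a ha; ring

-- B's ends comprehension computes endsAux
theorem endsAux_spec (m : List Bool) (k : Int) :
    (PySem.List.enumerate (m.zip (m.drop 1 ++ [false])) k).filterMap boundaryB
      = (endsAux m).map (· + k) := by
  induction m generalizing k with
  | nil => simp [endsAux]
  | cons c r ih =>
    have hz : (c :: r).zip ((c :: r).drop 1 ++ [false])
        = (c, r.headD false) :: r.zip (r.drop 1 ++ [false]) := by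
      cases r <;> rfl
    rw [hz, PySem.List.enumerate_cons, List.filterMap_cons, ih (k + 1), endsAux]
    by_cases hc : c = true ∧ r.head?.getD false = false
    · simp [boundaryB, hc, List.map_map]
      intro a ha; ring
    · simp [boundaryB, hc, List.map_map]
      intro a ha; ring

theorem startsAux_nonneg (m : List Bool) (prev : Bool) (x : Int) (hx : x ∈ startsAux prev m) : 0 ≤ x := by
  induction m generalizing prev x with
  | nil => simp [startsAux] at hx
  | cons c r ih =>
    rw [startsAux] at hx
    rcases List.mem_append.1 hx with h | h
    · split at h <;> simp_all
    · obtain ⟨y, hy, rfl⟩ := List.mem_map.1 h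
      have := ih c y hy; omega

theorem endsAux_nonneg (m : List Bool) (x : Int) (hx : x ∈ endsAux m) : 0 ≤ x := by
  induction m generalizing x with
  | nil => simp [endsAux] at hx
  | cons c r ih =>
    rw [endsAux] at hx
    rcases List.mem_append.1 hx with h | h
    · split at h <;> simp_all
    · obtain ⟨y, hy, rfl⟩ := List.mem_map.1 h
      have := ih y hy; omega

-- shifting both slice bounds by k is slicing the k-dropped list
theorem slice_shift {α : Type} (xs : List α) (k : Nat) (s e : Int) (hs : 0 ≤ s) (he : 0 ≤ e) :
    PySem.List.slice xs (some (s + k)) (some (e + k)) = PySem.List.slice (xs.drop k) (some s) (some e) := by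
  rw [PySem.List.slice_toNat xs (show (0:Int) ≤ s + k by omega) (show (0:Int) ≤ e + k by omega),
    PySem.List.slice_toNat (xs.drop k) hs he, List.drop_drop]
  congr 1
  · omega
  · congr 1; omega

-- a list's takeWhile-length take/drop are takeWhile/dropWhile
theorem take_takeWhile {α : Type} (l : List α) (p : α → Bool) :
    l.take (l.takeWhile p).length = l.takeWhile p := by
  induction l with
  | nil => rfl
  | cons a l ih =>
    by_cases h : p a = true <;> simp [h, ih]

theorem drop_takeWhile {α : Type} (l : List α) (p : α → Bool) :
    l.drop (l.takeWhile p).length = l.dropWhile p := by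
  induction l with
  | nil => rfl
  | cons a l ih =>
    by_cases h : p a = true <;> simp [h, ih]

-- after a true with no pending boundary, starts restart at the next false-to-true edge
theorem startsAux_true (m : List Bool) :
    startsAux true m = (startsAux false (m.dropWhile id)).map (· + ((m.takeWhile id).length : Int)) := by
  induction m with
  | nil => simp [startsAux]
  | cons c r ih =>
    cases c with
    | true =>
      rw [startsAux, ih]
      simp [List.map_map]
    | false =>
      rw [startsAux]
      simp [startsAux]

-- the ends of a run of trues: one boundary at the end of the run, then recurse
theorem endsAux_run (m : List Bool) :
    endsAux (true :: m) = ((m.takeWhile id).length : Int)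
      :: (endsAux (m.dropWhile id)).map (· + (((m.takeWhile id).length : Int) + 1)) := by
  induction m with
  | nil => simp [endsAux]
  | cons c r ih =>
    cases c with
    | true =>
      rw [endsAux, ih]
      simp [List.map_map]
    | false =>
      rw [endsAux]
      simp [endsAux, List.map_map]

-- the main correspondence: B's zip-of-boundaries slicing produces the run joins
theorem zip_boundaries_joined (l : List (String × String)) :
    ((startsAux false (l.map (fun wt => wt.2 != "O"))).zip
        (endsAux (l.map (fun wt => wt.2 != "O")))).map
      (fun se => PySem.Str.join " " (PySem.List.slice (l.map (fun wt => wt.1)) (some se.1) (some (se.2 + 1))))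
      = joined l := by
  match l with
  | [] => simp [startsAux, endsAux, joined]
  | p :: rest =>
    by_cases hp : (p.2 != "O") = true
    · have hm : (p :: rest).map (fun wt => wt.2 != "O") = true :: rest.map (fun wt => wt.2 != "O") := by
        simp [hp]
      have hj : joined (p :: rest)
          = PySem.Str.join " " ((p :: rest.takeWhile (fun q => q.2 != "O")).map Prod.fst)
            :: joined (rest.dropWhile (fun q => q.2 != "O")) := by
        rw [joined]; simp [hp]
      rw [hm, hj, startsAux, endsAux_run, startsAux_true]
      rw [List.takeWhile_map, List.dropWhile_map]
      simp only [Function.id_comp, List.length_map]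
      simp only [Bool.not_false, Bool.and_self, reduceIte, List.singleton_append, List.map_map,
        List.zip_cons_cons, List.map_cons]
      congr 1
      · -- the first run: slice from 0 is the take of the run length
        simp only [PySem.List.slice_zero_start]
        rw [PySem.List.slice_to]
        rw [show (((List.takeWhile (fun wt => wt.2 != "O") rest).length : Int) + 1).toNat
            = (List.takeWhile (fun wt => wt.2 != "O") rest).length + 1 from by omega]
        rw [List.take_succ_cons, ← List.map_take, take_takeWhile]
        omega
      · rw [← zip_boundaries_joined (rest.dropWhile (fun q => q.2 != "O"))]
        simp [List.zip_map, List.map_map]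
        intro a b hab
        obtain ⟨h1, h2⟩ := List.of_mem_zip hab
        have hs := startsAux_nonneg _ _ _ h1
        have he := endsAux_nonneg _ _ h2
        have h0 := slice_shift (p.1 :: List.map (fun wt => wt.1) rest)
          ((List.takeWhile (fun wt => wt.2 != "O") rest).length + 1) a (b + 1) hs (by omega)
        rw [List.drop_succ_cons, ← List.map_drop, drop_takeWhile] at h0
        push_cast at h0 ⊢
        ring_nf at h0 ⊢
        rw [h0]
    · have hpf : (p.2 != "O") = false := by simpa using hp
      have hj : joined (p :: rest) = joined rest := by rw [joined]; simp [hpf]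
      rw [hj, ← zip_boundaries_joined rest]
      simp only [List.map_cons, hpf, startsAux, endsAux]
      simp [List.zip_map, List.map_map]
      intro a b hab
      obtain ⟨h1, h2⟩ := List.of_mem_zip hab
      have hs := startsAux_nonneg _ _ _ h1
      have he := endsAux_nonneg _ _ h2
      have h := slice_shift (p.1 :: List.map (fun wt => wt.1) rest) 1 a (b + 1) hs (by omega)
      simp only [Nat.cast_one, List.drop_succ_cons, List.drop_zero] at h
      rw [h]
termination_by l.length
decreasing_by
  all_goals simp only [List.length_cons]
  all_goals first
    | exact Nat.lt_succ_of_le (List.length_dropWhile_le _ _)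
    | omega

-- B unfolded to the common reference value
theorem alt_eq_joined (l : List (String × String)) :
    ner_sequences_py_alt l = PySem.Set.ofList (joined l) := by
  have h1 : PySem.List.slice (l.map (fun wt => wt.2 != "O")) (some 1) none
      = (l.map (fun wt => wt.2 != "O")).drop 1 := by
    rw [PySem.List.slice_from]
    · norm_num
    · norm_num
  simp only [ner_sequences_py_alt, h1]
  rw [startsAux_spec, endsAux_spec]
  simp only [add_zero, List.map_id']
  rw [zip_boundaries_joined]

-- ===== VERDICT =====
theorem ner_sequences_py_spec : Claim_equal_ner_sequences_py := by
  intro l _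
  show ner_sequences_py l = ner_sequences_py_alt l
  rw [ner_sequences_py, ← loopA_eq_fold, loopA_joined, alt_eq_joined]
  rfl
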